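-- pv_equiv track=rewrite | github.com/MonicaRondon/CIT590 | Assignment 05 Squarelotron/Assignment5Rondon/squarelotron.py | inverse_diagonal_flip
-- ===== SOURCE A (Python) =====
-- def make_squarelotron(list):
--     """Given a "flat" list of 25 numbers, make and return a squarelotron"""
--     assert len(list) == 25
--     # take list of 25 numbers
--     # tell computer to take the first 5 numbers and put into 1 list
--     # tell computer to take the next 5 numbers and put into 1 list
--     # do this three more times
--     # return new list of lists
--     squarelotron = []
--     for i in range(0, 25, 5):
--         squarelotron.append(list[i: i + 5])
--     return squarelotron
--
-- def make_list(squarelotron):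
--     """Given a squarelotron, makes and returns a flat list of 25 numbers"""
--     list = []
--     #take squarelotron list, add the first row to the empty list
--     #add the second row to the empty list
--     #do this three more times
--     #return full flat list
--     for row in squarelotron:
--         list = list + row
--     return list
--
-- def swap(list, index, distance):
--     """swaps two spots on a FLAT list based on a starter index and distance
--     between the starter and end index"""
--     hold = list[index]
--     list[index] = list[index + distance] #flips location value
--     list[index + distance] = hold
--
-- def inverse_diagonal_flip(squarelotron, ring):
--     """Performs the Main Inverse Diagonal of the squarelotron,
--     and returns the new squarelotron."""
--     new_squarelotron = make_list(squarelotron)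
--     if ring == "inner":
--         swap(new_squarelotron, 6, 12)
--         for i in range(7, 12, 4):
--             swap(new_squarelotron, i, 6)
--         return make_squarelotron(new_squarelotron)
--     if ring == "outer":
--         for i in range(0, 4):
--             swap(new_squarelotron, i, (24 - (6 * i)))
--         for i in range(5, 16, 5):
--             swap(new_squarelotron, i, (24 - (6 * (int(i/5)))))
--     return make_squarelotron(new_squarelotron)
-- ===== SOURCE B (Python) =====
-- def inverse_diagonal_flip(squarelotron, ring):
--     """Performs the Main Inverse Diagonal flip of the squarelotron,
--     and returns the new squarelotron."""
--     flat = [x for row in squarelotron for x in row]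
--     assert len(flat) == 25
--     layer = 0 if ring == "outer" else 1 if ring == "inner" else None
--     if layer is not None:
--         flat = [flat[5 * (4 - p % 5) + (4 - p // 5)]
--                 if min(p // 5, p % 5, 4 - p // 5, 4 - p % 5) == layer
--                 else flat[p]
--                 for p in range(25)]
--     return [flat[i:i + 5] for i in range(0, 25, 5)]
-- ===== Notes on version B (the rewrite author's own statement) =====
-- stated objective: simpler
-- what changed: Replaces A's hard-coded per-ring sequences of in-place pairwise swaps on the flat list with a single anti-diagonal index-mapping pass (new[p] = flat[5*(4-p%5)+(4-p//5)] for cells on the chosen ring) over the flattened grid.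
import Mathlib
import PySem

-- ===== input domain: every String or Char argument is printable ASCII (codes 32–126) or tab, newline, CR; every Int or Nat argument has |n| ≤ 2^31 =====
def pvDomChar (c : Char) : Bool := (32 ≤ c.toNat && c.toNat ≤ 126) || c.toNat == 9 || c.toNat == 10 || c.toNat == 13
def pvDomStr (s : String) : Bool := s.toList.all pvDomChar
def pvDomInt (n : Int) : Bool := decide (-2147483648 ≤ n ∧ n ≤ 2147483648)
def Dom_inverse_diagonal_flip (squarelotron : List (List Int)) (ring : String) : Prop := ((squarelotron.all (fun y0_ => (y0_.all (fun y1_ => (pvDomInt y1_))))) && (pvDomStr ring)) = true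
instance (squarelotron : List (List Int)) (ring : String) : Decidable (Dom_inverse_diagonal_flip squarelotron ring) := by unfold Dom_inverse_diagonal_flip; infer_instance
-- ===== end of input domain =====

-- B replaces A's hard-coded per-ring swap sequences with one anti-diagonal index-mapping pass (simpler); return values only (neither program mutates its argument).

-- ===== PORT A =====

-- swap(list, index, distance): in-place swap, ported as returning the updated list.
-- Python reads list[index] and list[index+distance] before the first write lands on a
-- DIFFERENT position (distance ≠ 0 at every call site), so reading both from l is exact.
-- pyGet? = none is Python's IndexError (excluded by Pre_); the unchanged list is returned only there.
def pvSwap (l : List Int) (index : Int) (distance : Int) : List Int :=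
  match PySem.List.pyGet? l index with
  | none => l
  | some hold =>
    match PySem.List.pyGet? l (index + distance) with
    | none => l
    | some v => PySem.List.pySetD (PySem.List.pySetD l index v) (index + distance) hold

def pvMakeList (squarelotron : List (List Int)) : List Int :=
  squarelotron.foldl (fun acc row => acc ++ row) []

-- make_squarelotron: 'assert len(list) == 25' raises AssertionError when the flat list
-- does not have 25 elements; exactly those inputs are excluded by Pre_.
def pvMakeSquarelotron (l : List Int) : List (List Int) :=
  (PySem.List.pyRange 0 25 5).foldl
    (fun acc i => acc ++ [PySem.List.slice l (some i) (some (i + 5))]) []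

def inverse_diagonal_flip (squarelotron : List (List Int)) (ring : String) : List (List Int) :=
  let new_squarelotron := pvMakeList squarelotron
  if ring == "inner" then
    let s1 := pvSwap new_squarelotron 6 12
    let s2 := (PySem.List.pyRange 7 12 4).foldl (fun l i => pvSwap l i 6) s1
    pvMakeSquarelotron s2
  else if ring == "outer" then  -- Python's second 'if' is only reached when ring ≠ "inner" (that branch returns)
    let s1 := (PySem.List.pyRange 0 4 1).foldl (fun l i => pvSwap l i (24 - 6 * i)) new_squarelotron
    let s2 := (PySem.List.pyRange 5 16 5).foldl (fun l i => pvSwap l i (24 - 6 * PySem.Int.truncdiv i 5)) s1  -- int(i/5) on nonneg i = truncdiv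
    pvMakeSquarelotron s2
  else
    pvMakeSquarelotron new_squarelotron

-- ===== PORT B =====
def inverse_diagonal_flip_alt (squarelotron : List (List Int)) (ring : String) : List (List Int) :=
  let flat := squarelotron.flatMap id
  -- 'assert len(flat) == 25' raises AssertionError when the grid does not flatten to 25 entries (excluded by Pre_)
  let layer? : Option Int := if ring == "outer" then some 0 else if ring == "inner" then some 1 else none
  let flat2 :=
    match layer? with
    | none => flat
    | some layer =>
        (PySem.List.pyRange 0 25 1).map (fun p =>
          let r := PySem.Int.floordiv p 5
          let c := PySem.Int.mod p 5
          if min (min r c) (min (4 - r) (4 - c)) = layer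
          then PySem.List.pyGetD flat (5 * (4 - c) + (4 - r)) 0  -- flat[...]: in range under Pre_
          else PySem.List.pyGetD flat p 0)
  (PySem.List.pyRange 0 25 5).map (fun i => PySem.List.slice flat2 (some i) (some (i + 5)))

-- ===== PRECONDITION & SPEC =====
-- A returns normally exactly when the grid flattens to 25 entries; otherwise
-- make_squarelotron's assert (or an out-of-range swap) raises.
def Pre_inverse_diagonal_flip (squarelotron : List (List Int)) (ring : String) : Prop :=
  (squarelotron.flatMap id).length = 25

instance (squarelotron : List (List Int)) (ring : String) : Decidable (Pre_inverse_diagonal_flip squarelotron ring) := by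
  unfold Pre_inverse_diagonal_flip; infer_instance

def pvWitness_inverse_diagonal_flip : List (List Int) × String :=
  ([[1, 2, 3, 4, 5], [6, 7, 8, 9, 10], [11, 12, 13, 14, 15], [16, 17, 18, 19, 20], [21, 22, 23, 24, 25]], "outer")

def Spec_inverse_diagonal_flip (squarelotron : List (List Int)) (ring : String) (out : List (List Int)) : Prop := out = inverse_diagonal_flip_alt squarelotron ring
instance (squarelotron : List (List Int)) (ring : String) (out : List (List Int)) : Decidable (Spec_inverse_diagonal_flip squarelotron ring out) := by unfold Spec_inverse_diagonal_flip; infer_instance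

-- ===== CLAIM (what is proved, stated in full; the proofs are below) =====
def Claim_equal_inverse_diagonal_flip : Prop := ∀ (squarelotron : List (List Int)) (ring : String), Dom_inverse_diagonal_flip squarelotron ring → Pre_inverse_diagonal_flip squarelotron ring → Spec_inverse_diagonal_flip squarelotron ring (inverse_diagonal_flip squarelotron ring)

-- ===== LEMMAS AND PROOFS =====

lemma pvMakeList_eq_flatMap (sq : List (List Int)) : pvMakeList sq = sq.flatMap id := by
  simpa [pvMakeList] using PySem.List.foldl_append_eq_flatMap (fun (row : List Int) => row) sq []

-- Both cores agree on every flat list of length 25: destructure all 25 elements, then compute.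
set_option maxHeartbeats 1000000 in
lemma pv_core (ring : String) (l : List Int) (h : l.length = 25) :
    (if ring == "inner" then
      pvMakeSquarelotron ((PySem.List.pyRange 7 12 4).foldl (fun l i => pvSwap l i 6) (pvSwap l 6 12))
    else if ring == "outer" then
      pvMakeSquarelotron ((PySem.List.pyRange 5 16 5).foldl (fun l i => pvSwap l i (24 - 6 * PySem.Int.truncdiv i 5))
        ((PySem.List.pyRange 0 4 1).foldl (fun l i => pvSwap l i (24 - 6 * i)) l))
    else pvMakeSquarelotron l) =
    (let flat2 :=
      match (if ring == "outer" then some (0 : Int) else if ring == "inner" then some 1 else none) with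
      | none => l
      | some layer =>
          (PySem.List.pyRange 0 25 1).map (fun p =>
            let r := PySem.Int.floordiv p 5
            let c := PySem.Int.mod p 5
            if min (min r c) (min (4 - r) (4 - c)) = layer
            then PySem.List.pyGetD l (5 * (4 - c) + (4 - r)) 0
            else PySem.List.pyGetD l p 0)
      (PySem.List.pyRange 0 25 5).map (fun i => PySem.List.slice flat2 (some i) (some (i + 5)))) := by
  rcases l with _|⟨a0, l⟩; · simp at h
  rcases l with _|⟨a1, l⟩; · simp at h
  rcases l with _|⟨a2, l⟩; · simp at h
  rcases l with _|⟨a3, l⟩; · simp at h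
  rcases l with _|⟨a4, l⟩; · simp at h
  rcases l with _|⟨a5, l⟩; · simp at h
  rcases l with _|⟨a6, l⟩; · simp at h
  rcases l with _|⟨a7, l⟩; · simp at h
  rcases l with _|⟨a8, l⟩; · simp at h
  rcases l with _|⟨a9, l⟩; · simp at h
  rcases l with _|⟨a10, l⟩; · simp at h
  rcases l with _|⟨a11, l⟩; · simp at h
  rcases l with _|⟨a12, l⟩; · simp at h
  rcases l with _|⟨a13, l⟩; · simp at h
  rcases l with _|⟨a14, l⟩; · simp at h
  rcases l with _|⟨a15, l⟩; · simp at h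
  rcases l with _|⟨a16, l⟩; · simp at h
  rcases l with _|⟨a17, l⟩; · simp at h
  rcases l with _|⟨a18, l⟩; · simp at h
  rcases l with _|⟨a19, l⟩; · simp at h
  rcases l with _|⟨a20, l⟩; · simp at h
  rcases l with _|⟨a21, l⟩; · simp at h
  rcases l with _|⟨a22, l⟩; · simp at h
  rcases l with _|⟨a23, l⟩; · simp at h
  rcases l with _|⟨a24, l⟩; · simp at h
  rcases l with _|⟨x, l⟩
  swap
  · simp at h
  rw [show PySem.List.pyRange 7 12 4 = [7, 11] from by decide,
      show PySem.List.pyRange 0 4 1 = [0, 1, 2, 3] from by decide,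
      show PySem.List.pyRange 5 16 5 = [5, 10, 15] from by decide]
  rw [List.foldl_cons, List.foldl_cons, List.foldl_nil]
  rw [List.foldl_cons, List.foldl_cons, List.foldl_cons, List.foldl_cons, List.foldl_nil]
  rw [List.foldl_cons, List.foldl_cons, List.foldl_cons, List.foldl_nil]
  rw [show pvSwap [a0,a1,a2,a3,a4,a5,a6,a7,a8,a9,a10,a11,a12,a13,a14,a15,a16,a17,a18,a19,a20,a21,a22,a23,a24] 6 12 = [a0,a1,a2,a3,a4,a5,a18,a7,a8,a9,a10,a11,a12,a13,a14,a15,a16,a17,a6,a19,a20,a21,a22,a23,a24] from rfl]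
  rw [show pvSwap [a0,a1,a2,a3,a4,a5,a18,a7,a8,a9,a10,a11,a12,a13,a14,a15,a16,a17,a6,a19,a20,a21,a22,a23,a24] 7 6 = [a0,a1,a2,a3,a4,a5,a18,a13,a8,a9,a10,a11,a12,a7,a14,a15,a16,a17,a6,a19,a20,a21,a22,a23,a24] from rfl]
  rw [show pvSwap [a0,a1,a2,a3,a4,a5,a18,a13,a8,a9,a10,a11,a12,a7,a14,a15,a16,a17,a6,a19,a20,a21,a22,a23,a24] 11 6 = [a0,a1,a2,a3,a4,a5,a18,a13,a8,a9,a10,a17,a12,a7,a14,a15,a16,a11,a6,a19,a20,a21,a22,a23,a24] from rfl]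
  rw [show pvSwap [a0,a1,a2,a3,a4,a5,a6,a7,a8,a9,a10,a11,a12,a13,a14,a15,a16,a17,a18,a19,a20,a21,a22,a23,a24] 0 (24 - 6 * 0) = [a24,a1,a2,a3,a4,a5,a6,a7,a8,a9,a10,a11,a12,a13,a14,a15,a16,a17,a18,a19,a20,a21,a22,a23,a0] from rfl]
  rw [show pvSwap [a24,a1,a2,a3,a4,a5,a6,a7,a8,a9,a10,a11,a12,a13,a14,a15,a16,a17,a18,a19,a20,a21,a22,a23,a0] 1 (24 - 6 * 1) = [a24,a19,a2,a3,a4,a5,a6,a7,a8,a9,a10,a11,a12,a13,a14,a15,a16,a17,a18,a1,a20,a21,a22,a23,a0] from rfl]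
  rw [show pvSwap [a24,a19,a2,a3,a4,a5,a6,a7,a8,a9,a10,a11,a12,a13,a14,a15,a16,a17,a18,a1,a20,a21,a22,a23,a0] 2 (24 - 6 * 2) = [a24,a19,a14,a3,a4,a5,a6,a7,a8,a9,a10,a11,a12,a13,a2,a15,a16,a17,a18,a1,a20,a21,a22,a23,a0] from rfl]
  rw [show pvSwap [a24,a19,a14,a3,a4,a5,a6,a7,a8,a9,a10,a11,a12,a13,a2,a15,a16,a17,a18,a1,a20,a21,a22,a23,a0] 3 (24 - 6 * 3) = [a24,a19,a14,a9,a4,a5,a6,a7,a8,a3,a10,a11,a12,a13,a2,a15,a16,a17,a18,a1,a20,a21,a22,a23,a0] from rfl]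
  rw [show pvSwap [a24,a19,a14,a9,a4,a5,a6,a7,a8,a3,a10,a11,a12,a13,a2,a15,a16,a17,a18,a1,a20,a21,a22,a23,a0] 5 (24 - 6 * PySem.Int.truncdiv 5 5) = [a24,a19,a14,a9,a4,a23,a6,a7,a8,a3,a10,a11,a12,a13,a2,a15,a16,a17,a18,a1,a20,a21,a22,a5,a0] from rfl]
  rw [show pvSwap [a24,a19,a14,a9,a4,a23,a6,a7,a8,a3,a10,a11,a12,a13,a2,a15,a16,a17,a18,a1,a20,a21,a22,a5,a0] 10 (24 - 6 * PySem.Int.truncdiv 10 5) = [a24,a19,a14,a9,a4,a23,a6,a7,a8,a3,a22,a11,a12,a13,a2,a15,a16,a17,a18,a1,a20,a21,a10,a5,a0] from rfl]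
  rw [show pvSwap [a24,a19,a14,a9,a4,a23,a6,a7,a8,a3,a22,a11,a12,a13,a2,a15,a16,a17,a18,a1,a20,a21,a10,a5,a0] 15 (24 - 6 * PySem.Int.truncdiv 15 5) = [a24,a19,a14,a9,a4,a23,a6,a7,a8,a3,a22,a11,a12,a13,a2,a21,a16,a17,a18,a1,a20,a15,a10,a5,a0] from rfl]
  by_cases h1 : ring = "inner"
  · subst h1; rfl
  by_cases h2 : ring = "outer"
  · subst h2; rfl
  · simp only [beq_iff_eq, h1, h2, if_false]
    rfl

-- ===== VERDICT (by name: the statement is the Claim_ definition above) =====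
theorem inverse_diagonal_flip_spec : Claim_equal_inverse_diagonal_flip := by
  intro sq ring _ hpre
  unfold Spec_inverse_diagonal_flip inverse_diagonal_flip inverse_diagonal_flip_alt
  rw [pvMakeList_eq_flatMap]
  by_cases h1 : ring == "inner" <;> by_cases h2 : ring == "outer" <;>
    simpa [h1, h2] using pv_core ring (sq.flatMap id) hpre
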